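-- pv_equiv track=rewrite | github.com/MarcTheSpark/marcpy | utilities.py | get_interval_cycle_distance
-- ===== SOURCE A (Python) =====
-- def get_interval_cycle_length(cycle_size):
--     x = cycle_size
--     length = 1
--     while x % 12 != 0:
--         x += cycle_size
--         length += 1
--     return length
--
-- def get_interval_cycle_distance(pc1, pc2, cycle_size):
--     cycle_length = get_interval_cycle_length(cycle_size)
--     distance = 0
--     while (pc1 - pc2) % 12 != 0:
--         pc2 += cycle_size
--         distance += 1
--         if distance > cycle_length:
--             return - 1
--     if distance > cycle_length/2:
--         return cycle_length-distance
--     return distance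
-- ===== SOURCE B (Python) =====
-- def _egcd(a, b):
--     # extended Euclid: returns (g, x, y) with a*x + b*y == g == gcd(a, b) for a, b >= 0
--     if b == 0:
--         return (a, 1, 0)
--     g, x, y = _egcd(b, a % b)
--     return (g, y, x - (a // b) * y)
--
-- def get_interval_cycle_distance(pc1, pc2, cycle_size):
--     r = cycle_size % 12
--     g = _egcd(r, 12)[0]
--     cycle_length = 12 // g
--     d = (pc1 - pc2) % 12
--     if d % g != 0:
--         return -1
--     inv = _egcd((r // g) % cycle_length, cycle_length)[1] % cycle_length
--     k = (d // g) * inv % cycle_length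
--     return cycle_length - k if 2 * k > cycle_length else k
-- ===== Notes on version B (the rewrite author's own statement) =====
-- stated objective: alternative
-- what changed: Replaced A's two incremental stepping loops (one to find the cycle length, one to step pc2 until it matches) by a closed-form modular solve: g = gcd(cycle_size % 12, 12) via extended Euclid, cycle_length = 12 // g, solvability test d % g == 0, then the unique step count k from the modular inverse, folded to the shorter direction.
import Mathlib
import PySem

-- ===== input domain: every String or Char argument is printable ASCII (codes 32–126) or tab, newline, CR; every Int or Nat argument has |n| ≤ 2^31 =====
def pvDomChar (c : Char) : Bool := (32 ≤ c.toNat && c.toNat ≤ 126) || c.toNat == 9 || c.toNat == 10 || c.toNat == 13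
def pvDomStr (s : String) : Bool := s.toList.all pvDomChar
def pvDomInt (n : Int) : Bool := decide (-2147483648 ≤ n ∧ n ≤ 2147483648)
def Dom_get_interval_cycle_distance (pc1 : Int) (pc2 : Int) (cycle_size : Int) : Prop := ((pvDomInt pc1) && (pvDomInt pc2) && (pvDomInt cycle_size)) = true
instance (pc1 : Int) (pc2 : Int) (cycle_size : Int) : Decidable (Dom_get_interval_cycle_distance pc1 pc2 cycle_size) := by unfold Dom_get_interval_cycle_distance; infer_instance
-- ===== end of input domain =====

-- B replaces A's two stepping loops by a closed-form modular-arithmetic solve (gcd + extended-Euclid inverse); objective: alternative algorithm.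

-- ===== PORT A =====
-- while x % 12 != 0: x += cycle_size; length += 1   (fuel 12 is a totality guard only:
-- the loop always stops within 11 steps since 12*cycle_size % 12 == 0)
def icl_loop : Nat → Int → Int → Int → Int
  | 0, _, _, length => length
  | fuel+1, cs, x, length =>
    if PySem.Int.mod x 12 ≠ 0 then icl_loop fuel cs (x + cs) (length + 1) else length

def get_interval_cycle_length (cycle_size : Int) : Int :=
  icl_loop 12 cycle_size cycle_size 1

-- while (pc1 - pc2) % 12 != 0: pc2 += cycle_size; distance += 1; if distance > cycle_length: return -1
-- then: return cycle_length - distance if distance > cycle_length/2 else distance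
-- ('distance > cycle_length/2' on integers is exactly '2*distance > cycle_length').
-- Fuel 14 is a totality guard only: the loop returns -1 once distance reaches cycle_length+1 ≤ 13.
def icd_loop : Nat → Int → Int → Int → Int → Int → Int
  | 0, _, _, _, _, distance => distance
  | fuel+1, pc1, pc2, cs, cl, distance =>
    if PySem.Int.mod (pc1 - pc2) 12 ≠ 0 then
      if distance + 1 > cl then -1
      else icd_loop fuel pc1 (pc2 + cs) cs cl (distance + 1)
    else if 2 * distance > cl then cl - distance else distance

def get_interval_cycle_distance (pc1 : Int) (pc2 : Int) (cycle_size : Int) : Int :=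
  icd_loop 14 pc1 pc2 cycle_size (get_interval_cycle_length cycle_size) 0

-- ===== PORT B =====
-- extended Euclid from Source B; fuel 24 is a totality guard only (arguments stay in [0,12])
def egcd : Nat → Int → Int → Int × Int × Int
  | 0, a, _ => (a, 1, 0)
  | fuel+1, a, b =>
    if b = 0 then (a, 1, 0)
    else
      let t := egcd fuel b (PySem.Int.mod a b)
      (t.1, t.2.2, t.2.1 - PySem.Int.floordiv a b * t.2.2)

def get_interval_cycle_distance_alt (pc1 : Int) (pc2 : Int) (cycle_size : Int) : Int :=
  let r := PySem.Int.mod cycle_size 12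
  let g := (egcd 24 r 12).1
  let cl := PySem.Int.floordiv 12 g
  let d := PySem.Int.mod (pc1 - pc2) 12
  if PySem.Int.mod d g ≠ 0 then -1
  else
    let inv := PySem.Int.mod (egcd 24 (PySem.Int.mod (PySem.Int.floordiv r g) cl) cl).2.1 cl
    let k := PySem.Int.mod (PySem.Int.floordiv d g * inv) cl
    if 2 * k > cl then cl - k else k

-- ===== PRECONDITION & SPEC =====
def Spec_get_interval_cycle_distance (pc1 : Int) (pc2 : Int) (cycle_size : Int) (out : Int) : Prop := out = get_interval_cycle_distance_alt pc1 pc2 cycle_size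
instance (pc1 : Int) (pc2 : Int) (cycle_size : Int) (out : Int) : Decidable (Spec_get_interval_cycle_distance pc1 pc2 cycle_size out) := by unfold Spec_get_interval_cycle_distance; infer_instance

-- ===== CLAIM (what is proved, stated in full; the proofs are below) =====
def Claim_equal_get_interval_cycle_distance : Prop := ∀ (pc1 : Int) (pc2 : Int) (cycle_size : Int), Dom_get_interval_cycle_distance pc1 pc2 cycle_size → Spec_get_interval_cycle_distance pc1 pc2 cycle_size (get_interval_cycle_distance pc1 pc2 cycle_size)

-- ===== LEMMAS AND PROOFS =====

-- A's inner loop only depends on x and cycle_size through their residues mod 12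
theorem icl_congr (fuel : Nat) (cs cs' x x' len : Int)
    (hc : cs % 12 = cs' % 12) (hx : x % 12 = x' % 12) :
    icl_loop fuel cs x len = icl_loop fuel cs' x' len := by
  induction fuel generalizing x x' len with
  | zero => rfl
  | succ n ih =>
    simp only [icl_loop, PySem.Int.mod_eq_emod_of_pos (by norm_num : (0:Int) < 12), hx]
    split
    · exact ih (x + cs) (x' + cs') (len + 1) (by omega)
    · rfl

-- A's main loop only depends on pc1 - pc2 and cycle_size through their residues mod 12
theorem icd_congr (fuel : Nat) (p1 p2 p1' p2' cs cs' cl dist : Int)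
    (h : (p1 - p2) % 12 = (p1' - p2') % 12) (hc : cs % 12 = cs' % 12) :
    icd_loop fuel p1 p2 cs cl dist = icd_loop fuel p1' p2' cs' cl dist := by
  induction fuel generalizing p2 p2' dist with
  | zero => rfl
  | succ n ih =>
    simp only [icd_loop, PySem.Int.mod_eq_emod_of_pos (by norm_num : (0:Int) < 12), h]
    split
    · split
      · rfl
      · exact ih (p2 + cs) (p2' + cs') (dist + 1) (by omega)
    · rfl

theorem A_residue (p1 p2 cs : Int) :
    get_interval_cycle_distance p1 p2 cs
      = get_interval_cycle_distance ((p1 - p2) % 12) 0 (cs % 12) := by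
  unfold get_interval_cycle_distance get_interval_cycle_length
  rw [icl_congr 12 cs (cs % 12) cs (cs % 12) 1 (by omega) (by omega)]
  exact icd_congr 14 p1 p2 ((p1 - p2) % 12) 0 cs (cs % 12) _ 0 (by omega) (by omega)

theorem B_residue (p1 p2 cs : Int) :
    get_interval_cycle_distance_alt p1 p2 cs
      = get_interval_cycle_distance_alt ((p1 - p2) % 12) 0 (cs % 12) := by
  simp only [get_interval_cycle_distance_alt]
  rw [show PySem.Int.mod ((p1 - p2) % 12 - 0) 12 = PySem.Int.mod (p1 - p2) 12 by
        rw [PySem.Int.mod_eq_emod_of_pos (by norm_num : (0:Int) < 12),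
            PySem.Int.mod_eq_emod_of_pos (by norm_num : (0:Int) < 12)]; omega,
      show PySem.Int.mod (cs % 12) 12 = PySem.Int.mod cs 12 by
        rw [PySem.Int.mod_eq_emod_of_pos (by norm_num : (0:Int) < 12),
            PySem.Int.mod_eq_emod_of_pos (by norm_num : (0:Int) < 12)]; omega]

-- both programs agree on all residue pairs
set_option maxHeartbeats 1000000 in
theorem core : ∀ (d : Nat), d < 12 → ∀ (r : Nat), r < 12 →
    get_interval_cycle_distance (d : Int) 0 (r : Int)
      = get_interval_cycle_distance_alt (d : Int) 0 (r : Int) := by decide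

-- ===== VERDICT (by name: the statement is the Claim_ definition above) =====
theorem get_interval_cycle_distance_spec : Claim_equal_get_interval_cycle_distance := by
  intro p1 p2 cs _
  unfold Spec_get_interval_cycle_distance
  rw [A_residue, B_residue]
  have hd : (0:Int) ≤ (p1 - p2) % 12 ∧ (p1 - p2) % 12 < 12 := by omega
  have hr : (0:Int) ≤ cs % 12 ∧ cs % 12 < 12 := by omega
  have h := core ((p1 - p2) % 12).toNat (by omega) (cs % 12).toNat (by omega)
  rwa [Int.toNat_of_nonneg hd.1, Int.toNat_of_nonneg hr.1] at h
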